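-- pv_equiv track=rewrite | github.com/Egor1501/HomeWork_10_08 | 1.py | geometry
-- ===== SOURCE A (Python) =====
-- def geometry(start, stop):
--     index = 1
--     while index <= stop:
--         new_number = start * 2
--         yield new_number
--         start = new_number
--         index += 1
--     return
-- ===== SOURCE B (Python) =====
-- def geometry(start, stop):
--     # closed form: the i-th yielded value is start shifted left i bits (= start * 2**i)
--     for i in range(1, stop + 1):
--         yield start << i
-- ===== Notes on version B (the rewrite author's own statement) =====
-- stated objective: alternative
-- what changed: Replaces the while-loop with a mutated running accumulator by a closed-form loop over range(1, stop+1) yielding start << i (= start * 2**i) directly, with no reassigned state.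
import Mathlib
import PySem

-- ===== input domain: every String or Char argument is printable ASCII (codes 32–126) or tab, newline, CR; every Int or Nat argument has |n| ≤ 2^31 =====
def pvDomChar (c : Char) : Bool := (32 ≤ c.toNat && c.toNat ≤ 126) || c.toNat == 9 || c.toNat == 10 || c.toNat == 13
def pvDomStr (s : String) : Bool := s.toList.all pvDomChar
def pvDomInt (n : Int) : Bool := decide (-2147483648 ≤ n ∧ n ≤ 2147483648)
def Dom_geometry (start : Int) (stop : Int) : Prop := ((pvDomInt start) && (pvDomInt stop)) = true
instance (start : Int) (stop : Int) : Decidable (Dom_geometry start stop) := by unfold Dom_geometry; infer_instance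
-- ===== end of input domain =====

-- B drops A's mutated running accumulator and yields each term in closed form (start * 2**i); same values, alternative decomposition.

-- ===== PORT A =====
-- while index <= stop: yield start*2; start = start*2; index += 1
-- (the while-loop runs exactly stop.toNat times: index counts 1..stop; ported as structural recursion on that count)
def geomA (start : Int) (n : Nat) : List Int :=
  match n with
  | 0 => []
  | Nat.succ m => (start * 2) :: geomA (start * 2) m

def geometry (start : Int) (stop : Int) : List Int := geomA start stop.toNat

-- ===== PORT B =====
-- for i in range(1, stop + 1): yield start << i
-- (Python's `start << i` for i ≥ 0 is exactly start * 2^i on arbitrary-precision ints, including negative start; every i drawn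
--  from range(1, stop+1) is ≥ 1, so the hand-port `start * 2 ^ i.toNat` is exact)
def geometry_alt (start : Int) (stop : Int) : List Int :=
  (PySem.List.pyRange 1 (stop + 1) 1).map (fun i => start * 2 ^ i.toNat)

-- ===== PRECONDITION & SPEC =====
def Spec_geometry (start : Int) (stop : Int) (out : List Int) : Prop := out = geometry_alt start stop
instance (start : Int) (stop : Int) (out : List Int) : Decidable (Spec_geometry start stop out) := by unfold Spec_geometry; infer_instance

-- ===== CLAIM (what is proved, stated in full; the proofs are below) =====
def Claim_equal_geometry : Prop := ∀ (start : Int) (stop : Int), Dom_geometry start stop → Spec_geometry start stop (geometry start stop)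

-- ===== LEMMAS AND PROOFS =====
theorem geomA_eq (n : Nat) : ∀ (start : Int),
    geomA start n = (List.range n).map (fun k => start * 2 ^ (k + 1)) := by
  induction n with
  | zero => intro start; rfl
  | succ m ih =>
    intro start
    rw [geomA, List.range_succ_eq_map, List.map_cons, List.map_map, ih (start * 2)]
    refine congrArg₂ _ (by ring) ?_
    apply List.map_congr_left
    intro k _
    simp only [Function.comp_apply, Nat.succ_eq_add_one, pow_succ]
    ring

theorem geometry_eq_alt (start stop : Int) : geometry start stop = geometry_alt start stop := by
  unfold geometry geometry_alt
  rw [geomA_eq stop.toNat start, PySem.List.pyRange_one, List.map_map]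
  simp only [add_sub_cancel_right]
  refine congrArg (fun f => List.map f (List.range stop.toNat)) ?_
  funext k
  simp only [Function.comp_apply]
  have : ((1 : Int) + (k : Int)).toNat = k + 1 := by omega
  rw [this]

-- ===== VERDICT (by name: the statement is the Claim_ definition above) =====
theorem geometry_spec : Claim_equal_geometry := by
  intro start stop _
  exact geometry_eq_alt start stop
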